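-- pv_equiv track=rewrite | github.com/in-vane/electron-lab | python/tasks/check_page_number.py | check_page_number_issues
-- ===== SOURCE A (Python) =====
-- def check_page_number_issues(printed_page_numbers, physical_page_numbers):
--     issues = []  # 初始化问题列表
--     start_index = None  # 找到第一个非None打印页码的索引
--     correct_page_numbers = printed_page_numbers.copy()  # 创建正确页码的副本以进行修改
--
--     # 查找第一个非None打印页码的索引
--     for index, page_number in enumerate(printed_page_numbers):
--         if page_number is not None:
--             start_index = index
--             break
--
--     # 如果找到了有效的起始页码
--     if start_index is not None:
--         # 生成从第一个有效数字开始的连续页码序列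
--         expected_number = printed_page_numbers[start_index]
--         for i in range(start_index, len(printed_page_numbers)):
--             correct_page_numbers[i] = expected_number
--             expected_number += 1
--
--     # 比较实际页码与正确页码，记录不一致的物理页码
--     for i in range(len(printed_page_numbers)):
--         if printed_page_numbers[i] != correct_page_numbers[i]:
--             issues.append(physical_page_numbers[i])
--
--     return issues
-- ===== SOURCE B (Python) =====
-- def check_page_number_issues(printed_page_numbers, physical_page_numbers):
--     # Single streaming pass: track the expected printed number once the first
--     # non-None printed number fixes the sequence; no copied list, no extra loops.
--     issues = []
--     expected = None
--     for i, p in enumerate(printed_page_numbers):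
--         if expected is None:
--             if p is not None:
--                 expected = p + 1
--         else:
--             if p != expected:
--                 issues.append(physical_page_numbers[i])
--             expected += 1
--     return issues
-- ===== Notes on version B (the rewrite author's own statement) =====
-- stated objective: simpler
-- what changed: B replaces A's three loops and mutated copy of the printed list (build correct_page_numbers, then compare element-wise) with one streaming pass that carries a single 'expected' counter and appends a physical page directly on mismatch.
import Mathlib
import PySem

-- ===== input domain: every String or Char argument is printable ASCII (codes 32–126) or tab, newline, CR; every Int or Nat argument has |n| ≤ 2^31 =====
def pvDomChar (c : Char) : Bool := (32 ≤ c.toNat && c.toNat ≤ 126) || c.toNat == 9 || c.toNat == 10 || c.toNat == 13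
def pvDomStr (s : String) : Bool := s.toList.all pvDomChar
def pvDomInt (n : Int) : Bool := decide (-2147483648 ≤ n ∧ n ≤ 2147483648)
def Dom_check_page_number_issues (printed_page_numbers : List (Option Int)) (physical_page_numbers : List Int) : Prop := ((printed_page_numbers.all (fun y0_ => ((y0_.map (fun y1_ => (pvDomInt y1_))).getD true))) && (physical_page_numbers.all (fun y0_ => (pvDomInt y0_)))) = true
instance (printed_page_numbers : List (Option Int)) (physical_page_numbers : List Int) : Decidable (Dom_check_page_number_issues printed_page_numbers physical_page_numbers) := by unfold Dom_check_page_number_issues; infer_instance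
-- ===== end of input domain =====

-- B replaces A's three loops and mutated copy of the printed list with one streaming
-- pass carrying a single expected counter (objective: simpler; same O(n) cost).


-- ===== PORT A =====
-- first loop of A: index of the first non-None printed page number
def pvA_findStart : List (Option Int) → Nat → Option Nat
  | [], _ => none
  | p :: rest, idx =>
    match p with
    | some _ => some idx
    | none => pvA_findStart rest (idx + 1)

-- second loop of A: correct_page_numbers[i] = expected; expected += 1, for i in range(i, stop)
def pvA_fill (correct : List (Option Int)) (i stop : Nat) (e : Int) : List (Option Int) :=
  if i < stop then pvA_fill (correct.set i (some e)) (i + 1) stop (e + 1) else correct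
termination_by stop - i

-- third loop of A: collect physical pages where printed and correct disagree.
-- printed[i]/correct[i] are in range for i < stop; physical[i] (indexed only on a
-- mismatch, as in A) uses pyGetD: the IndexError case is excluded by Pre_ below.
def pvA_collect (printed correct : List (Option Int)) (physical : List Int) (i stop : Nat) (issues : List Int) : List Int :=
  if i < stop then
    pvA_collect printed correct physical (i + 1) stop
      (if printed[i]? ≠ correct[i]? then issues ++ [PySem.List.pyGetD physical (i : Int) 0] else issues)
  else issues
termination_by stop - i

def check_page_number_issues (printed_page_numbers : List (Option Int)) (physical_page_numbers : List Int) : List Int :=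
  let correct := printed_page_numbers   -- printed_page_numbers.copy()
  let correct :=
    match pvA_findStart printed_page_numbers 0 with
    | none => correct
    | some s =>
        -- expected_number = printed_page_numbers[start_index]  (in range and non-None by construction)
        pvA_fill correct s printed_page_numbers.length ((printed_page_numbers[s]?.getD none).getD 0)
  pvA_collect printed_page_numbers correct physical_page_numbers 0 printed_page_numbers.length []

-- ===== PORT B =====
-- B's loop after the first non-None was seen: expected is e at index i
def pvB_go (rest : List (Option Int)) (physical : List Int) (i : Nat) (e : Int) : List Int :=
  match rest with
  | [] => []
  | p :: tl =>
    if p ≠ some e then PySem.List.pyGetD physical (i : Int) 0 :: pvB_go tl physical (i + 1) (e + 1)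
    else pvB_go tl physical (i + 1) (e + 1)

-- B's loop while expected is still None
def pvB_start : List (Option Int) → List Int → Nat → List Int
  | [], _, _ => []
  | none :: tl, ph, i => pvB_start tl ph (i + 1)
  | some b :: tl, ph, i => pvB_go tl ph (i + 1) (b + 1)

def check_page_number_issues_alt (printed_page_numbers : List (Option Int)) (physical_page_numbers : List Int) : List Int :=
  pvB_start printed_page_numbers physical_page_numbers 0

-- ===== PRECONDITION & SPEC =====
-- Pre_ excludes exactly the inputs where Python A raises IndexError: a mismatching
-- index (past the first non-None printed number) that is out of range in
-- physical_page_numbers.  (B raises there too.)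
def Pre_check_page_number_issues (printed_page_numbers : List (Option Int)) (physical_page_numbers : List Int) : Prop :=
  Option.all (fun s =>
      (List.range printed_page_numbers.length).all (fun i =>
        decide (i ≤ s) ||
        (printed_page_numbers[i]? ==
          some (some ((printed_page_numbers[s]?.getD none).getD 0 + ((i : Int) - (s : Int))))) ||
        decide (i < physical_page_numbers.length)))
    (printed_page_numbers.findIdx? Option.isSome) = true
instance (printed_page_numbers : List (Option Int)) (physical_page_numbers : List Int) : Decidable (Pre_check_page_number_issues printed_page_numbers physical_page_numbers) := by unfold Pre_check_page_number_issues; infer_instance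

def pvWitness_check_page_number_issues : List (Option Int) × List Int := ([some 1, none, some 3], [10, 20, 30])

def Spec_check_page_number_issues (printed_page_numbers : List (Option Int)) (physical_page_numbers : List Int) (out : List Int) : Prop := out = check_page_number_issues_alt printed_page_numbers physical_page_numbers
instance (printed_page_numbers : List (Option Int)) (physical_page_numbers : List Int) (out : List Int) : Decidable (Spec_check_page_number_issues printed_page_numbers physical_page_numbers out) := by unfold Spec_check_page_number_issues; infer_instance

-- ===== CLAIM (what is proved, stated in full; the proofs are below) =====
def Claim_equal_check_page_number_issues : Prop := ∀ (printed_page_numbers : List (Option Int)) (physical_page_numbers : List Int), Dom_check_page_number_issues printed_page_numbers physical_page_numbers → Pre_check_page_number_issues printed_page_numbers physical_page_numbers → Spec_check_page_number_issues printed_page_numbers physical_page_numbers (check_page_number_issues printed_page_numbers physical_page_numbers)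

-- ===== LEMMAS AND PROOFS =====

lemma fill_getElem? (correct : List (Option Int)) (i stop : Nat) (e : Int)
    (hstop : stop ≤ correct.length) (j : Nat) :
    (pvA_fill correct i stop e)[j]? =
      if i ≤ j ∧ j < stop then some (some (e + ((j : Int) - i))) else correct[j]? := by
  fun_induction pvA_fill correct i stop e with
  | case1 correct i e h ih =>
    rw [ih (by simpa using hstop), List.getElem?_set]
    simp only [List.length_set] at *
    split_ifs <;>
      first
        | rfl
        | (exfalso; omega)
        | (simp only [Option.some.injEq]; push_cast; omega)
  | case2 correct i e h =>
    have : ¬ (i ≤ j ∧ j < stop) := by omega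
    simp [this]

lemma collect_append (p c : List (Option Int)) (ph : List Int) (stop : Nat) :
    ∀ n i, stop - i ≤ n → ∀ issues,
      pvA_collect p c ph i stop issues = issues ++ pvA_collect p c ph i stop [] := by
  intro n
  induction n with
  | zero =>
    intro i hi issues
    rw [pvA_collect.eq_def]; conv_rhs => rw [pvA_collect.eq_def]
    have : ¬ i < stop := by omega
    simp [this]
  | succ n ih =>
    intro i hi issues
    rw [pvA_collect.eq_def]; conv_rhs => rw [pvA_collect.eq_def]
    split_ifs with h hc
    · rw [ih (i + 1) (by omega) (issues ++ [PySem.List.pyGetD ph (i : Int) 0]),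
          ih (i + 1) (by omega) ([] ++ [PySem.List.pyGetD ph (i : Int) 0])]
      simp
    · exact ih (i + 1) (by omega) issues
    · simp

lemma collect_self (p : List (Option Int)) (ph : List Int) (stop : Nat) :
    ∀ n i, stop - i ≤ n → pvA_collect p p ph i stop [] = [] := by
  intro n
  induction n with
  | zero =>
    intro i hi
    rw [pvA_collect.eq_def]
    have : ¬ i < stop := by omega
    simp [this]
  | succ n ih =>
    intro i hi
    rw [pvA_collect.eq_def]
    by_cases h : i < stop
    · rw [if_pos h, if_neg (by simp : ¬ p[i]? ≠ p[i]?)]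
      exact ih (i + 1) (by omega)
    · simp [h]

lemma findStart_shift (l : List (Option Int)) (k : Nat) :
    pvA_findStart l k = (l.findIdx? Option.isSome).map (· + k) := by
  induction l generalizing k with
  | nil => rfl
  | cons x tl ih =>
    cases x with
    | none =>
      rw [pvA_findStart, ih (k + 1), List.findIdx?_cons]
      cases List.findIdx? Option.isSome tl with
      | none => rfl
      | some a =>
        simp only [Option.isSome_none, Bool.false_eq_true, if_false, Option.map_some]
        congr 1
        omega
    | some v => simp [pvA_findStart, List.findIdx?_cons]

lemma go_none (l : List (Option Int)) (ph : List Int) :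
    ∀ i, (∀ x ∈ l, x = none) → pvB_start l ph i = [] := by
  induction l with
  | nil => intro i _; rfl
  | cons x tl ih =>
    intro i h
    have hx : x = none := h x (by simp)
    subst hx
    exact ih (i + 1) (fun y hy => h y (by simp [hy]))

lemma skip_eq (printed : List (Option Int)) (ph : List Int) (s : Nat) (b : Int)
    (hs : s < printed.length) (hsb : printed[s]? = some (some b)) :
    ∀ n i, s + 1 - i ≤ n → i ≤ s + 1 →
      pvA_collect printed (pvA_fill printed s printed.length b) ph i printed.length [] =
      pvA_collect printed (pvA_fill printed s printed.length b) ph (s + 1) printed.length [] := by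
  intro n
  induction n with
  | zero =>
    intro i h1 h2
    have : i = s + 1 := by omega
    subst this; rfl
  | succ n ih =>
    intro i h1 h2
    by_cases he : i = s + 1
    · subst he; rfl
    · have hi : i ≤ s := by omega
      have hilen : i < printed.length := by omega
      have hcond : printed[i]? = (pvA_fill printed s printed.length b)[i]? := by
        rw [fill_getElem? printed s printed.length b le_rfl i]
        by_cases hie : i = s
        · subst hie
          simp [hsb]
        · have : ¬ (s ≤ i ∧ i < printed.length) := by omega
          simp [this]
      rw [pvA_collect.eq_def, if_pos hilen, if_neg (by simp [hcond])]
      exact ih (i + 1) (by omega) (by omega)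

lemma tail_eq (printed : List (Option Int)) (ph : List Int) (s : Nat) (b : Int) :
    ∀ n i, printed.length - i ≤ n → s < i →
      pvA_collect printed (pvA_fill printed s printed.length b) ph i printed.length [] =
      pvB_go (printed.drop i) ph i (b + ((i : Int) - s)) := by
  intro n
  induction n with
  | zero =>
    intro i h1 h2
    have hge : printed.length ≤ i := by omega
    rw [pvA_collect.eq_def]
    have : ¬ i < printed.length := by omega
    simp [this, List.drop_eq_nil_of_le hge, pvB_go]
  | succ n ih =>
    intro i h1 h2
    by_cases hilen : i < printed.length
    · have hdrop : printed.drop i = printed[i] :: printed.drop (i + 1) :=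
        List.drop_eq_getElem_cons hilen
      have hcorr : (pvA_fill printed s printed.length b)[i]? =
          some (some (b + ((i : Int) - s))) := by
        rw [fill_getElem? printed s printed.length b le_rfl i]
        have : s ≤ i ∧ i < printed.length := by omega
        simp [this]
      have hpi : printed[i]? = some printed[i] := List.getElem?_eq_getElem hilen
      have hexp : b + ((i : Int) - s) + 1 = b + (((i : Nat) + 1 : Int) - s) := by
        ring
      rw [pvA_collect.eq_def, if_pos hilen]
      simp only [hcorr, hpi, ne_eq, Option.some.injEq]
      rw [collect_append printed (pvA_fill printed s printed.length b) ph printed.length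
            (printed.length - (i + 1)) (i + 1) (by omega)]
      rw [ih (i + 1) (by omega) (by omega)]
      rw [hdrop, pvB_go]
      by_cases hc : printed[i] = some (b + ((i : Int) - s))
      · simp [hc, hexp]
      · simp [hc, hexp]
    · rw [pvA_collect.eq_def]
      simp [hilen, List.drop_eq_nil_of_le (by omega : printed.length ≤ i), pvB_go]

lemma start_eq (printed : List (Option Int)) (ph : List Int) (s : Nat) (b : Int)
    (hs : s < printed.length) (hsg : printed[s] = some b)
    (hnone : ∀ j, (hj : j < s) → printed[j]'(by omega) = none) :
    ∀ n i, s - i ≤ n → i ≤ s →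
      pvB_start (printed.drop i) ph i = pvB_go (printed.drop (s + 1)) ph (s + 1) (b + 1) := by
  intro n
  induction n with
  | zero =>
    intro i h1 h2
    have : i = s := by omega
    subst this
    rw [List.drop_eq_getElem_cons hs, hsg, pvB_start]
  | succ n ih =>
    intro i h1 h2
    by_cases he : i = s
    · subst he
      rw [List.drop_eq_getElem_cons hs, hsg, pvB_start]
    · have hi : i < s := by omega
      rw [List.drop_eq_getElem_cons (by omega : i < printed.length), hnone i hi, pvB_start]
      exact ih (i + 1) (by omega) (by omega)

-- ===== VERDICT (by name: the statement is the Claim_ definition above) =====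
theorem check_page_number_issues_spec : Claim_equal_check_page_number_issues := by
  intro printed ph _ _
  unfold Spec_check_page_number_issues
  unfold check_page_number_issues check_page_number_issues_alt
  rw [findStart_shift printed 0]
  cases hf : printed.findIdx? Option.isSome with
  | none =>
    simp only [Option.map_none]
    rw [collect_self printed ph printed.length printed.length 0 (by omega)]
    rw [go_none printed ph 0]
    intro x hx
    have := (List.findIdx?_eq_none_iff.mp hf) x hx
    cases x with
    | none => rfl
    | some v => simp at this
  | some s =>
    simp only [Option.map_some]
    have hfi := List.findIdx?_eq_some_iff_findIdx_eq.mp hf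
    have hs : s < printed.length := hfi.1
    have hsome : (printed[s]'hs).isSome := by
      have := @List.findIdx_getElem _ Option.isSome printed (by rw [hfi.2]; exact hs)
      simpa [hfi.2] using this
    obtain ⟨b, hb⟩ := Option.isSome_iff_exists.mp hsome
    have hsb : printed[s]? = some (some b) := by
      rw [List.getElem?_eq_getElem hs, hb]
    have hbase : (printed[s]?.getD none).getD 0 = b := by rw [hsb]; rfl
    have hnone : ∀ j, (hj : j < s) → printed[j]'(by omega) = none := by
      intro j hj
      have h1 := List.not_of_lt_findIdx (p := Option.isSome) (xs := printed) (by rw [hfi.2]; exact hj)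
      rw [Option.isSome_eq_false_iff, Option.isNone_iff_eq_none] at h1
      exact h1
    simp only [Nat.add_zero, hbase]
    rw [skip_eq printed ph s b hs hsb (s + 1) 0 (by omega) (by omega)]
    rw [tail_eq printed ph s b (printed.length - (s + 1)) (s + 1) (by omega) (by omega)]
    have h1 : b + (((s : Nat) + 1 : Int) - s) = b + 1 := by ring
    rw [show ((s + 1 : Nat) : Int) = ((s : Nat) + 1 : Int) by simp, h1]
    rw [← start_eq printed ph s b hs hb hnone s 0 (by omega) (by omega)]
    rfl
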